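-- pv_equiv track=rewrite | github.com/SinaLYZ/HSIDNCNN | main_test_hsi_dncnn.py | get_neighbor_indices
-- ===== SOURCE A (Python) =====
-- def fix_index(idx, num_bands, boundary_mode):
--     if boundary_mode == 'reflect':
--         while idx < 0 or idx >= num_bands:
--             if idx < 0:
--                 idx = -idx
--             if idx >= num_bands:
--                 idx = 2 * num_bands - 2 - idx
--         return idx
--
--     if boundary_mode == 'replicate':
--         return min(max(idx, 0), num_bands - 1)
--
--     if boundary_mode == 'wrap':
--         return idx % num_bands
--
--     raise ValueError(f'Unsupported boundary_mode: {boundary_mode}')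
--
-- def get_neighbor_indices(target_band, num_bands, in_bands, boundary_mode):
--     half = in_bands // 2
--     raw_indices = list(range(target_band - half, target_band + half + 1))
--
--     if boundary_mode in ['valid', 'skip']:
--         if min(raw_indices) < 0 or max(raw_indices) >= num_bands:
--             return None
--         return raw_indices
--
--     return [fix_index(i, num_bands, boundary_mode) for i in raw_indices]
-- ===== SOURCE B (Python) =====
-- def fix_index(idx, num_bands, boundary_mode):
--     if boundary_mode == 'reflect':
--         if 0 <= idx < num_bands:
--             return idx
--         period = 2 * (num_bands - 1)
--         m = idx % period
--         return m if m < num_bands else period - m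
--
--     if boundary_mode == 'replicate':
--         return min(max(idx, 0), num_bands - 1)
--
--     if boundary_mode == 'wrap':
--         return idx % num_bands
--
--     raise ValueError(f'Unsupported boundary_mode: {boundary_mode}')
--
-- def get_neighbor_indices(target_band, num_bands, in_bands, boundary_mode):
--     half = in_bands // 2
--     lo, hi = target_band - half, target_band + half
--
--     if boundary_mode in ('valid', 'skip'):
--         if lo < 0 or hi >= num_bands:
--             return None
--         return list(range(lo, hi + 1))
--
--     return [fix_index(i, num_bands, boundary_mode) for i in range(lo, hi + 1)]
-- ===== Notes on version B (the rewrite author's own statement) =====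
-- stated objective: alternative
-- what changed: fix_index's 'reflect' while-loop is replaced by a closed-form modular triangle-wave (idx % (2*(num_bands-1)) folded back), and get_neighbor_indices checks the range bounds arithmetically instead of building the list and scanning it with min()/max().
import Mathlib
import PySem

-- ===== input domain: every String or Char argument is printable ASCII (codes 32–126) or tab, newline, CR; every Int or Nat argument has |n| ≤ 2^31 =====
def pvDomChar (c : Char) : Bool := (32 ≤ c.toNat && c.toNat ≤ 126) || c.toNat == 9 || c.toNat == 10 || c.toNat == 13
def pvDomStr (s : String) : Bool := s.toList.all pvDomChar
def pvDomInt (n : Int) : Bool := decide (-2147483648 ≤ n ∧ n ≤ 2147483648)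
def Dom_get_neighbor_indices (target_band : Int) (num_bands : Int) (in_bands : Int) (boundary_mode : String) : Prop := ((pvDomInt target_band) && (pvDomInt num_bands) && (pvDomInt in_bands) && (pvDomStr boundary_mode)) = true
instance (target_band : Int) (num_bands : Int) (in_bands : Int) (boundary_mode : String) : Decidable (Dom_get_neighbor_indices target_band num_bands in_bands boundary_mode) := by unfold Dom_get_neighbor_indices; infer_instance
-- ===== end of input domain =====

-- B replaces A's 'reflect' while-loop by a closed-form modular triangle-wave and the
-- min()/max() scan of the built range by a direct bounds check (return value only; neither mutates).

-- ===== PORT A =====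
-- A's reflect while-loop, with fuel (the Python loop diverges for num_bands ≤ 1 on an
-- out-of-range index; those inputs are excluded by Pre_). none = fuel exhausted.
def reflectLoop (num_bands : Int) : Nat → Int → Option Int
  | 0, _ => none
  | fuel+1, idx =>
    if idx < 0 ∨ num_bands ≤ idx then
      let idx1 := if idx < 0 then -idx else idx
      let idx2 := if num_bands ≤ idx1 then 2 * num_bands - 2 - idx1 else idx1
      reflectLoop num_bands fuel idx2
    else some idx

-- fix_index; none = the loop diverging, ZeroDivisionError (wrap, num_bands = 0) or ValueError
def fix_index (idx : Int) (num_bands : Int) (boundary_mode : String) : Option Int :=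
  if boundary_mode = "reflect" then reflectLoop num_bands (idx.natAbs + 2) idx
  else if boundary_mode = "replicate" then some (min (max idx 0) (num_bands - 1))
  else if boundary_mode = "wrap" then PySem.Int.mod? idx num_bands
  else none

-- the list comprehension [fix_index(i, …) for i in raw_indices]
def mapFixA (num_bands : Int) (boundary_mode : String) : List Int → Option (List Int)
  | [] => some []
  | i :: rest =>
    match fix_index i num_bands boundary_mode, mapFixA num_bands boundary_mode rest with
    | some v, some vs => some (v :: vs)
    | _, _ => none

def get_neighbor_indices (target_band : Int) (num_bands : Int) (in_bands : Int) (boundary_mode : String) : Option (List Int) :=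
  let half := PySem.Int.floordiv in_bands 2
  let raw := PySem.List.pyRange (target_band - half) (target_band + half + 1) 1
  if boundary_mode = "valid" ∨ boundary_mode = "skip" then
    match PySem.List.min? raw (fun y => y), PySem.List.max? raw (fun y => y) with
    | some mn, some mx => if mn < 0 ∨ num_bands ≤ mx then none else some raw
    | _, _ => none   -- min()/max() of an empty list raises ValueError; outside Pre_
  else mapFixA num_bands boundary_mode raw

-- ===== PORT B =====
def fix_index_alt (idx : Int) (num_bands : Int) (boundary_mode : String) : Option Int :=
  if boundary_mode = "reflect" then
    if 0 ≤ idx ∧ idx < num_bands then some idx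
    else
      let period := 2 * (num_bands - 1)
      match PySem.Int.mod? idx period with   -- none = ZeroDivisionError (num_bands = 1)
      | some m => some (if m < num_bands then m else period - m)
      | none => none
  else if boundary_mode = "replicate" then some (min (max idx 0) (num_bands - 1))
  else if boundary_mode = "wrap" then PySem.Int.mod? idx num_bands
  else none

def mapFixB (num_bands : Int) (boundary_mode : String) : List Int → Option (List Int)
  | [] => some []
  | i :: rest =>
    match fix_index_alt i num_bands boundary_mode, mapFixB num_bands boundary_mode rest with
    | some v, some vs => some (v :: vs)
    | _, _ => none

def get_neighbor_indices_alt (target_band : Int) (num_bands : Int) (in_bands : Int) (boundary_mode : String) : Option (List Int) :=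
  let half := PySem.Int.floordiv in_bands 2
  let lo := target_band - half
  let hi := target_band + half
  if boundary_mode = "valid" ∨ boundary_mode = "skip" then
    if lo < 0 ∨ num_bands ≤ hi then none
    else some (PySem.List.pyRange lo (hi + 1) 1)
  else mapFixB num_bands boundary_mode (PySem.List.pyRange lo (hi + 1) 1)

-- ===== PRECONDITION & SPEC =====
-- Pre_ admits exactly the inputs on which the Python A returns: for 'valid'/'skip' a
-- nonempty window (else min([]) raises ValueError); an unsupported mode only with an empty
-- window (else fix_index raises ValueError); for 'wrap' a nonzero num_bands unless the
-- window is empty (else ZeroDivisionError); for 'reflect' either an empty window, or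
-- num_bands >= 2, or a window already inside [0, num_bands) (else the loop never terminates).
def Pre_get_neighbor_indices (target_band : Int) (num_bands : Int) (in_bands : Int) (boundary_mode : String) : Prop :=
  ((boundary_mode = "valid" ∨ boundary_mode = "skip") → 0 ≤ PySem.Int.floordiv in_bands 2) ∧
  (¬(boundary_mode = "valid" ∨ boundary_mode = "skip" ∨ boundary_mode = "replicate" ∨
       boundary_mode = "wrap" ∨ boundary_mode = "reflect") → PySem.Int.floordiv in_bands 2 < 0) ∧
  (boundary_mode = "wrap" → (PySem.Int.floordiv in_bands 2 < 0 ∨ num_bands ≠ 0)) ∧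
  (boundary_mode = "reflect" →
     (PySem.Int.floordiv in_bands 2 < 0 ∨ 2 ≤ num_bands ∨
      (0 ≤ target_band - PySem.Int.floordiv in_bands 2 ∧
       target_band + PySem.Int.floordiv in_bands 2 < num_bands)))
instance (target_band : Int) (num_bands : Int) (in_bands : Int) (boundary_mode : String) : Decidable (Pre_get_neighbor_indices target_band num_bands in_bands boundary_mode) := by unfold Pre_get_neighbor_indices; infer_instance

def pvWitness_get_neighbor_indices : Int × Int × Int × String := (2, 5, 3, "reflect")

def Spec_get_neighbor_indices (target_band : Int) (num_bands : Int) (in_bands : Int) (boundary_mode : String) (out : Option (List Int)) : Prop := out = get_neighbor_indices_alt target_band num_bands in_bands boundary_mode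
instance (target_band : Int) (num_bands : Int) (in_bands : Int) (boundary_mode : String) (out : Option (List Int)) : Decidable (Spec_get_neighbor_indices target_band num_bands in_bands boundary_mode out) := by unfold Spec_get_neighbor_indices; infer_instance

-- ===== CLAIM (what is proved, stated in full; the proofs are below) =====
def Claim_equal_get_neighbor_indices : Prop := ∀ (target_band : Int) (num_bands : Int) (in_bands : Int) (boundary_mode : String), Dom_get_neighbor_indices target_band num_bands in_bands boundary_mode → Pre_get_neighbor_indices target_band num_bands in_bands boundary_mode → Spec_get_neighbor_indices target_band num_bands in_bands boundary_mode (get_neighbor_indices target_band num_bands in_bands boundary_mode)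

-- ===== LEMMAS AND PROOFS =====

-- the closed-form triangle wave, stated with Int.emod (= Python's % for a positive divisor)
def triB (num_bands idx : Int) : Int :=
  if idx % (2 * (num_bands - 1)) < num_bands then idx % (2 * (num_bands - 1))
  else 2 * (num_bands - 1) - idx % (2 * (num_bands - 1))

lemma fmod_eq_emod_of_pos {a b : Int} (h : 0 < b) : Int.fmod a b = a % b := by
  have := PySem.Int.mod_eq_emod_of_pos (a := a) h
  simpa [PySem.Int.mod] using this

lemma triB_in_range {num_bands idx : Int} (h2 : 2 ≤ num_bands)
    (h0 : 0 ≤ idx) (h1 : idx < num_bands) : triB num_bands idx = idx := by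
  unfold triB
  rw [Int.emod_eq_of_lt h0 (by omega)]
  simp [h1]

lemma triB_neg {num_bands : Int} (h2 : 2 ≤ num_bands) (idx : Int) :
    triB num_bands (-idx) = triB num_bands idx := by
  have hp : (0:Int) < 2 * (num_bands - 1) := by omega
  have hm0 : 0 ≤ idx % (2 * (num_bands - 1)) := Int.emod_nonneg idx (by omega)
  have hmlt : idx % (2 * (num_bands - 1)) < 2 * (num_bands - 1) := Int.emod_lt_of_pos idx hp
  have habs : (((2 * (num_bands - 1)).natAbs : Int)) = 2 * (num_bands - 1) :=
    Int.natAbs_of_nonneg (by omega)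
  unfold triB
  by_cases hdvd : (2 * (num_bands - 1)) ∣ idx
  · have h0 : idx % (2 * (num_bands - 1)) = 0 := Int.emod_eq_zero_of_dvd hdvd
    rw [Int.neg_emod, if_pos hdvd, h0]
  · have hne : idx % (2 * (num_bands - 1)) ≠ 0 := fun h => hdvd (Int.dvd_of_emod_eq_zero h)
    rw [Int.neg_emod, if_neg hdvd, habs]
    split_ifs <;> omega

lemma triB_shift {num_bands : Int} (h2 : 2 ≤ num_bands) (idx : Int) :
    triB num_bands (2 * num_bands - 2 - idx) = triB num_bands idx := by
  have h : 2 * num_bands - 2 - idx = -idx + 2 * (num_bands - 1) * 1 := by ring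
  rw [h, ← triB_neg h2 idx]
  unfold triB
  rw [Int.add_mul_emod_self_left]

lemma reflectLoop_in_range {num_bands idx : Int} (h0 : 0 ≤ idx) (h1 : idx < num_bands) :
    ∀ fuel, 1 ≤ fuel → reflectLoop num_bands fuel idx = some idx := by
  intro fuel hf
  cases fuel with
  | zero => omega
  | succ f => simp [reflectLoop]; omega

lemma reflectLoop_eq {num_bands : Int} (h2 : 2 ≤ num_bands) :
    ∀ (fuel : Nat) (idx : Int), idx.natAbs + 2 ≤ fuel →
      reflectLoop num_bands fuel idx = some (triB num_bands idx) := by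
  intro fuel
  induction fuel with
  | zero => intro idx h; omega
  | succ f ih =>
    intro idx h
    by_cases hin : idx < 0 ∨ num_bands ≤ idx
    · -- loop body runs
      have step : reflectLoop num_bands (f+1) idx =
          reflectLoop num_bands f
            (if num_bands ≤ (if idx < 0 then -idx else idx)
             then 2 * num_bands - 2 - (if idx < 0 then -idx else idx)
             else (if idx < 0 then -idx else idx)) := by
        simp only [reflectLoop, if_pos hin]
      rw [step]
      set idx1 := if idx < 0 then -idx else idx with hidx1
      set idx2 := if num_bands ≤ idx1 then 2 * num_bands - 2 - idx1 else idx1 with hidx2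
      have htri1 : triB num_bands idx1 = triB num_bands idx := by
        by_cases hneg : idx < 0
        · rw [hidx1, if_pos hneg]; exact triB_neg h2 idx
        · rw [hidx1, if_neg hneg]
      have htri : triB num_bands idx2 = triB num_bands idx := by
        by_cases hge : num_bands ≤ idx1
        · rw [hidx2, if_pos hge, triB_shift h2, htri1]
        · rw [hidx2, if_neg hge, htri1]
      rw [← htri]
      by_cases hrange : 0 ≤ idx2 ∧ idx2 < num_bands
      · rw [reflectLoop_in_range hrange.1 hrange.2 f (by omega),
            triB_in_range h2 hrange.1 hrange.2]
      · -- idx2 strictly smaller in absolute value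
        have hdec : idx2.natAbs < idx.natAbs := by
          rcases hin with hlt | hge
          · by_cases hge1 : num_bands ≤ idx1
            · simp only [hidx2, hidx1, if_pos hlt] at *
              omega
            · exfalso
              simp only [hidx2, hidx1, if_pos hlt] at hrange
              omega
          · have hidx1' : idx1 = idx := by rw [hidx1, if_neg (by omega)]
            have hge1 : num_bands ≤ idx1 := by omega
            simp only [hidx2, hidx1'] at *
            omega
        exact ih idx2 (by omega)
    · rw [not_or, not_lt, not_le] at hin
      rw [reflectLoop_in_range (by omega) (by omega) (f+1) (by omega),
          triB_in_range h2 (by omega) (by omega)]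

lemma fix_index_eq_alt {idx num_bands : Int} {boundary_mode : String}
    (hmode : boundary_mode = "replicate" ∨ boundary_mode = "wrap" ∨ boundary_mode = "reflect")
    (hrefl : boundary_mode = "reflect" → (2 ≤ num_bands ∨ (0 ≤ idx ∧ idx < num_bands))) :
    fix_index idx num_bands boundary_mode = fix_index_alt idx num_bands boundary_mode := by
  rcases hmode with h | h | h
  · subst h; rfl
  · subst h; rfl
  · subst h
    rcases hrefl rfl with h2 | hin
    · -- num_bands ≥ 2: loop = triangle wave = B's formula
      have hp : (2 : Int) * (num_bands - 1) ≠ 0 := by omega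
      simp only [fix_index, fix_index_alt, PySem.Int.mod?, hp,
        reduceIte, fmod_eq_emod_of_pos (show (0:Int) < 2 * (num_bands - 1) by omega)]
      rw [reflectLoop_eq h2 (idx.natAbs + 2) idx (le_refl _)]
      by_cases hin : 0 ≤ idx ∧ idx < num_bands
      · rw [if_pos hin, triB_in_range h2 hin.1 hin.2]
      · rw [if_neg hin]; rfl
    · simp only [fix_index, fix_index_alt, reduceIte, if_pos hin]
      exact reflectLoop_in_range hin.1 hin.2 _ (by omega)

lemma mapFix_congr (num_bands : Int) (boundary_mode : String) (l : List Int)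
    (h : ∀ i ∈ l, fix_index i num_bands boundary_mode = fix_index_alt i num_bands boundary_mode) :
    mapFixA num_bands boundary_mode l = mapFixB num_bands boundary_mode l := by
  induction l with
  | nil => rfl
  | cons i rest ih =>
    simp only [mapFixA, mapFixB, h i (List.mem_cons_self ..),
      ih (fun j hj => h j (List.mem_cons_of_mem i hj))]

lemma minmax_pyRange {lo hi : Int} (h : lo ≤ hi) :
    PySem.List.min? (PySem.List.pyRange lo (hi + 1) 1) (fun y => y) = some lo ∧
    PySem.List.max? (PySem.List.pyRange lo (hi + 1) 1) (fun y => y) = some hi := by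
  have hlo : lo ∈ PySem.List.pyRange lo (hi + 1) 1 := by
    rw [PySem.List.mem_pyRange_one]; omega
  have hhi : hi ∈ PySem.List.pyRange lo (hi + 1) 1 := by
    rw [PySem.List.mem_pyRange_one]; omega
  constructor
  · cases hmn : PySem.List.min? (PySem.List.pyRange lo (hi + 1) 1) (fun y => y) with
    | none =>
      rw [PySem.List.min?_eq_none_iff] at hmn
      rw [hmn] at hlo; simp at hlo
    | some m =>
      have h1 := PySem.List.min?_isMin hmn lo hlo
      have h2 := PySem.List.mem_pyRange_one.1 (PySem.List.min?_mem hmn)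
      simp only [Option.some.injEq]
      omega
  · cases hmx : PySem.List.max? (PySem.List.pyRange lo (hi + 1) 1) (fun y => y) with
    | none =>
      rw [PySem.List.max?_eq_none_iff] at hmx
      rw [hmx] at hlo; simp at hlo
    | some m =>
      have h1 := PySem.List.max?_isMax hmx hi hhi
      have h2 := PySem.List.mem_pyRange_one.1 (PySem.List.max?_mem hmx)
      simp only [Option.some.injEq]
      omega

-- ===== VERDICT (by name: the statement is the Claim_ definition above) =====
theorem get_neighbor_indices_spec : Claim_equal_get_neighbor_indices := by
  intro target_band num_bands in_bands boundary_mode _ hpre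
  obtain ⟨hvs, hother, hwrap, hrefl⟩ := hpre
  unfold Spec_get_neighbor_indices get_neighbor_indices get_neighbor_indices_alt
  set half := PySem.Int.floordiv in_bands 2 with hhalf
  by_cases hv : boundary_mode = "valid" ∨ boundary_mode = "skip"
  · have h0 : 0 ≤ half := hvs hv
    have hle : target_band - half ≤ target_band + half := by omega
    obtain ⟨hmn, hmx⟩ := minmax_pyRange hle
    simp only [if_pos hv, hmn, hmx]
  · -- comprehension branch: pointwise equality of fix_index and fix_index_alt
    simp only [if_neg hv]
    apply mapFix_congr
    intro i hi
    rw [PySem.List.mem_pyRange_one] at hi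
    by_cases hfive : boundary_mode = "replicate" ∨ boundary_mode = "wrap" ∨ boundary_mode = "reflect"
    · apply fix_index_eq_alt hfive
      intro hbm
      rcases hrefl hbm with hneg | h2 | hin
      · omega
      · exact Or.inl h2
      · exact Or.inr ⟨by omega, by omega⟩
    · -- unsupported mode: Pre_ forces an empty window, so there is no element i
      exfalso
      have : half < 0 := hother (by tauto)
      omega
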